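-- pv_equiv track=rewrite | github.com/vikasagarwal11/beforedoctor | python/medical_qa_training/enhance_sparse_categories.py | _infer_category_from_question
-- ===== SOURCE A (Python) =====
-- def _infer_category_from_question(question: str) -> str:
--     """Infer category from question content"""
--     question_lower = question.lower()
--
--     if any(word in question_lower for word in ['emergency', 'urgent', 'critical']):
--         return 'emergency_procedures'
--     elif any(word in question_lower for word in ['rare', 'unusual', 'uncommon']):
--         return 'rare_conditions'
--     elif any(word in question_lower for word in ['treatment', 'therapy', 'medication']):
--         return 'specialized_treatments'
--     elif any(word in question_lower for word in ['pediatric', 'child', 'baby']):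
--         return 'pediatric_specialties'
--     else:
--         return 'general'
-- ===== SOURCE B (Python) =====
-- _KEYWORD_PRIORITY = {
--     'emergency': 0, 'urgent': 0, 'critical': 0,
--     'rare': 1, 'unusual': 1, 'uncommon': 1,
--     'treatment': 2, 'therapy': 2, 'medication': 2,
--     'pediatric': 3, 'child': 3, 'baby': 3,
-- }
--
-- _CATEGORIES = ['emergency_procedures', 'rare_conditions',
--                'specialized_treatments', 'pediatric_specialties', 'general']
--
--
-- def _infer_category_from_question(question: str) -> str:
--     """Single pass over all keywords keeping the minimum matched priority."""
--     question_lower = question.lower()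
--     best = 4  # priority of 'general'
--     for word, prio in _KEYWORD_PRIORITY.items():
--         if prio < best and word in question_lower:
--             best = prio
--     return _CATEGORIES[best]
-- ===== Notes on version B (the rewrite author's own statement) =====
-- stated objective: alternative
-- what changed: Replaces the early-return if/elif group chain with a single full pass over a flat keyword-to-priority map, keeping a minimum-priority accumulator and indexing the result into a category array.
import Mathlib
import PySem

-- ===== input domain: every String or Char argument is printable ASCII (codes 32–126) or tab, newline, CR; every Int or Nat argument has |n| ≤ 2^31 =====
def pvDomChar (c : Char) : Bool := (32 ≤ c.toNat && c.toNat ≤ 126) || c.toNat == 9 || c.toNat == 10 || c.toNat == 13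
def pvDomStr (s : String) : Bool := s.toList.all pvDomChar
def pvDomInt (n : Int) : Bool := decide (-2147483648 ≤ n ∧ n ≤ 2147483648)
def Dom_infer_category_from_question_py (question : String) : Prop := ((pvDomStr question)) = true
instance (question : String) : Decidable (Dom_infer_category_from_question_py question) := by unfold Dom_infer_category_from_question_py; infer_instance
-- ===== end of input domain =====

-- B replaces the early-return if/elif group chain with one full pass over a flat keyword→priority
-- map keeping a minimum-priority accumulator, then indexes a category array (alternative; same cost).
-- ===== PORT A =====
def infer_category_from_question_py (question : String) : String :=
  let question_lower := PySem.Str.lower question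
  if ["emergency", "urgent", "critical"].any (fun word => PySem.Str.isIn word question_lower) then
    "emergency_procedures"
  else if ["rare", "unusual", "uncommon"].any (fun word => PySem.Str.isIn word question_lower) then
    "rare_conditions"
  else if ["treatment", "therapy", "medication"].any (fun word => PySem.Str.isIn word question_lower) then
    "specialized_treatments"
  else if ["pediatric", "child", "baby"].any (fun word => PySem.Str.isIn word question_lower) then
    "pediatric_specialties"
  else
    "general"

-- ===== PORT B =====
def pvKeywordPriority : List (String × Nat) :=
  [("emergency", 0), ("urgent", 0), ("critical", 0),
   ("rare", 1), ("unusual", 1), ("uncommon", 1),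
   ("treatment", 2), ("therapy", 2), ("medication", 2),
   ("pediatric", 3), ("child", 3), ("baby", 3)]

def pvCategories : List String :=
  ["emergency_procedures", "rare_conditions", "specialized_treatments",
   "pediatric_specialties", "general"]

def infer_category_from_question_py_alt (question : String) : String :=
  let question_lower := PySem.Str.lower question
  let best := pvKeywordPriority.foldl
    (fun best wp => if wp.2 < best ∧ PySem.Str.isIn wp.1 question_lower then wp.2 else best) 4
  -- best is always ≤ 4, so this getD never takes the default (Python's _CATEGORIES[best])
  pvCategories.getD best ""

-- ===== PRECONDITION & SPEC =====
def Spec_infer_category_from_question_py (question : String) (out : String) : Prop := out = infer_category_from_question_py_alt question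
instance (question : String) (out : String) : Decidable (Spec_infer_category_from_question_py question out) := by unfold Spec_infer_category_from_question_py; infer_instance

-- ===== CLAIM (what is proved, stated in full; the proofs are below) =====
def Claim_equal_infer_category_from_question_py : Prop := ∀ (question : String), Dom_infer_category_from_question_py question → Spec_infer_category_from_question_py question (infer_category_from_question_py question)

-- ===== LEMMAS AND PROOFS =====

-- the whole comparison reduced to the 12 keyword-match booleans, checked exhaustively
theorem pv_key : ∀ (b1 b2 b3 b4 b5 b6 b7 b8 b9 b10 b11 b12 : Bool),
  (if (b1 || (b2 || (b3 || false))) = true then "emergency_procedures"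
   else if (b4 || (b5 || (b6 || false))) = true then "rare_conditions"
   else if (b7 || (b8 || (b9 || false))) = true then "specialized_treatments"
   else if (b10 || (b11 || (b12 || false))) = true then "pediatric_specialties"
   else "general")
  = pvCategories.getD
      (List.foldl (fun best wp => if wp.2 < best ∧ wp.1 = true then wp.2 else best) 4
        [(b1,0),(b2,0),(b3,0),(b4,1),(b5,1),(b6,1),(b7,2),(b8,2),(b9,2),(b10,3),(b11,3),(b12,3)]) "" := by
  decide

-- ===== VERDICT (by name: the statement is the Claim_ definition above) =====
set_option maxHeartbeats 4000000 in
theorem infer_category_from_question_py_spec : Claim_equal_infer_category_from_question_py := by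
  intro question _
  exact pv_key
    (PySem.Str.isIn "emergency" (PySem.Str.lower question))
    (PySem.Str.isIn "urgent" (PySem.Str.lower question))
    (PySem.Str.isIn "critical" (PySem.Str.lower question))
    (PySem.Str.isIn "rare" (PySem.Str.lower question))
    (PySem.Str.isIn "unusual" (PySem.Str.lower question))
    (PySem.Str.isIn "uncommon" (PySem.Str.lower question))
    (PySem.Str.isIn "treatment" (PySem.Str.lower question))
    (PySem.Str.isIn "therapy" (PySem.Str.lower question))
    (PySem.Str.isIn "medication" (PySem.Str.lower question))
    (PySem.Str.isIn "pediatric" (PySem.Str.lower question))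
    (PySem.Str.isIn "child" (PySem.Str.lower question))
    (PySem.Str.isIn "baby" (PySem.Str.lower question))
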